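-- pv_equiv track=rewrite | github.com/biowpn/MinimalCFG | python/CFG.py | eliminate_long_rules
-- ===== SOURCE A (Python) =====
-- def get_max_non_terminal(G):
--     nt_max = 0
--     for nt, subs in G:
--         if nt > nt_max:
--             nt_max = nt
--     return nt_max
--
-- def eliminate_long_rules(G):
--     '''
--     break down
--         A -> B1 B2 B3 B4
--     to
--         A -> B1 A1
--         A1 -> B2 A2
--         A2 -> B3 B4
--     '''
--     nt_new = get_max_non_terminal(G) + 1
--     G_out = []
--     for nt, subs in G:
--         if len(subs) > 2:
--             G_out.append((nt, [subs[0], nt_new]))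
--             for a in subs[1:-2]:
--                 G_out.append((nt_new, [a, nt_new + 1]))
--                 nt_new += 1
--             G_out.append((nt_new, subs[-2:]))
--             nt_new += 1
--         else:
--             G_out.append((nt, subs))
--     return G_out
-- ===== SOURCE B (Python) =====
-- def get_max_non_terminal(G):
--     nt_max = 0
--     for nt, subs in G:
--         if nt > nt_max:
--             nt_max = nt
--     return nt_max
--
-- def _binarize(nt, subs, c):
--     """Binarize one rule; returns (rules, next fresh non-terminal)."""
--     if len(subs) <= 2:
--         return [(nt, subs)], c
--     rest, c_out = _binarize(c, subs[1:], c + 1)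
--     return [(nt, [subs[0], c])] + rest, c_out
--
-- def eliminate_long_rules(G):
--     '''
--     break down
--         A -> B1 B2 B3 B4
--     to
--         A -> B1 A1
--         A1 -> B2 A2
--         A2 -> B3 B4
--     '''
--     out = []
--     c = get_max_non_terminal(G) + 1
--     for nt, subs in G:
--         rules, c = _binarize(nt, subs, c)
--         out += rules
--     return out
-- ===== Notes on version B (the rewrite author's own statement) =====
-- stated objective: alternative
-- what changed: Per-rule splitting (head append + inner loop over subs[1:-2] + tail append, mutating nt_new in place) is replaced by a recursive helper that binarizes one rule's symbol list and returns the rules together with the next fresh non-terminal, threaded through a fold over the grammar.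
import Mathlib
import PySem

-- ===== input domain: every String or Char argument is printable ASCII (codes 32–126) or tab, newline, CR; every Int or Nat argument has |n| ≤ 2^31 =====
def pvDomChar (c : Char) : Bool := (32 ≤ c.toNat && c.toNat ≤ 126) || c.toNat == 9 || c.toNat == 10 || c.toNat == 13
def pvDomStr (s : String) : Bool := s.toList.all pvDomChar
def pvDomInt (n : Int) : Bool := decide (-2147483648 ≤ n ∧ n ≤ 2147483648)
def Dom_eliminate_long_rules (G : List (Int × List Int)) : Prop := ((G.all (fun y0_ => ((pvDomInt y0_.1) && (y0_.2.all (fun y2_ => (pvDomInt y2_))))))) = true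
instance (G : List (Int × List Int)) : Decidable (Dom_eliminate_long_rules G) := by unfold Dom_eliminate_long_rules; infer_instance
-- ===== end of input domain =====

-- B replaces A's in-place per-rule loop (head append + inner slice loop + tail append)
-- by a recursive helper that binarizes one rule's symbol list, threading the fresh
-- non-terminal counter; objective: simpler (alternative decomposition, same cost).


-- ===== PORT A =====
-- get_max_non_terminal (shared verbatim by both Python versions)
def pvMaxNT (G : List (Int × List Int)) : Int :=
  G.foldl (fun nt_max p => if p.1 > nt_max then p.1 else nt_max) 0

-- body of A's `for nt, subs in G` loop; state = (G_out, nt_new)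
def pvStepA (st : List (Int × List Int) × Int) (p : Int × List Int) :
    List (Int × List Int) × Int :=
  let (G_out, nt_new) := st
  let (nt, subs) := p
  if subs.length > 2 then
    -- subs[0] as headI: the branch guarantees subs is nonempty, so it equals Python's subs[0]
    let G_out := G_out ++ [(nt, [subs.headI, nt_new])]
    let (G_out, nt_new) :=
      (PySem.List.slice subs (some 1) (some (-2))).foldl      -- subs[1:-2]
        (fun (st : List (Int × List Int) × Int) a =>
          (st.1 ++ [(st.2, [a, st.2 + 1])], st.2 + 1)) (G_out, nt_new)
    (G_out ++ [(nt_new, PySem.List.slice subs (some (-2)) none)], nt_new + 1)  -- subs[-2:]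
  else
    (G_out ++ [(nt, subs)], nt_new)

def eliminate_long_rules (G : List (Int × List Int)) : List (Int × List Int) :=
  (G.foldl pvStepA ([], pvMaxNT G + 1)).1

-- ===== PORT B =====
-- _binarize: binarize one rule; returns (rules, next fresh non-terminal)
def pvBinarize (nt : Int) (subs : List Int) (c : Int) : List (Int × List Int) × Int :=
  if subs.length ≤ 2 then
    ([(nt, subs)], c)
  else
    match subs with
    | [] => ([(nt, subs)], c)  -- unreachable: subs.length > 2 here
    | s0 :: rest =>            -- subs[0] = s0, subs[1:] = rest (subs is nonempty here)
      let r := pvBinarize c rest (c + 1)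
      ((nt, [s0, c]) :: r.1, r.2)

def eliminate_long_rules_alt (G : List (Int × List Int)) : List (Int × List Int) :=
  (G.foldl (fun (st : List (Int × List Int) × Int) p =>
      let r := pvBinarize p.1 p.2 st.2
      (st.1 ++ r.1, r.2))
    ([], pvMaxNT G + 1)).1

-- ===== PRECONDITION & SPEC =====
def Spec_eliminate_long_rules (G : List (Int × List Int)) (out : List (Int × List Int)) : Prop := out = eliminate_long_rules_alt G
instance (G : List (Int × List Int)) (out : List (Int × List Int)) : Decidable (Spec_eliminate_long_rules G out) := by unfold Spec_eliminate_long_rules; infer_instance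

-- ===== CLAIM (what is proved, stated in full; the proofs are below) =====
def Claim_equal_eliminate_long_rules : Prop := ∀ (G : List (Int × List Int)), Dom_eliminate_long_rules G → Spec_eliminate_long_rules G (eliminate_long_rules G)

-- ===== LEMMAS AND PROOFS =====

-- subs[1:-2] in take/tail form
lemma slice_mid (xs : List Int) (h : 3 ≤ xs.length) :
    PySem.List.slice xs (some 1) (some (-2)) = xs.tail.take (xs.length - 3) := by
  simp [PySem.List.slice, PySem.List.clampIdx]
  rw [if_neg (by omega), Nat.min_eq_left (by omega), List.drop_one]
  congr 1
  omega

-- unfolding of B's binarizer on a long rule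
lemma binarize_cons (nt c s0 : Int) (rest : List Int) (h : 2 ≤ rest.length) :
    pvBinarize nt (s0 :: rest) c =
      ((nt, [s0, c]) :: (pvBinarize c rest (c + 1)).1, (pvBinarize c rest (c + 1)).2) := by
  rw [pvBinarize]
  rw [if_neg (by simp; omega)]

-- A's long-rule branch peels one symbol and continues on the tail with the next counter
lemma stepA_shift (out : List (Int × List Int)) (nt c s0 : Int) (rest : List Int)
    (h : 2 ≤ rest.length) :
    pvStepA (out, c) (nt, s0 :: rest) =
      pvStepA (out ++ [(nt, [s0, c])], c + 1) (c, rest) := by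
  rcases Nat.lt_or_ge rest.length 3 with h3 | h3
  · -- rest.length = 2: inner loop on the left is empty, the right side copies rest
    have h2 : rest.length = 2 := by omega
    simp only [pvStepA]
    rw [if_pos (by simp; omega), if_neg (by omega)]
    rw [slice_mid _ (by simp; omega)]
    rw [PySem.List.slice_from_neg_ofNat _ 2 (by omega)]
    simp [h2]
  · -- rest.length ≥ 3: both sides take the long branch
    cases rest with
    | nil => simp at h3
    | cons r0 rest' =>
      simp only [List.length_cons] at h3
      simp only [pvStepA]
      rw [if_pos (by simp; omega), if_pos (by simp; omega)]
      rw [slice_mid _ (by simp; omega), slice_mid _ (by simp; omega)]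
      rw [PySem.List.slice_from_neg_ofNat (s0 :: r0 :: rest') 2 (by omega)]
      rw [PySem.List.slice_from_neg_ofNat (r0 :: rest') 2 (by omega)]
      simp only [List.length_cons, List.tail_cons, List.headI]
      rw [show rest'.length + 1 + 1 - 3 = (rest'.length + 1 - 3) + 1 by omega,
          List.take_succ_cons]
      rw [show rest'.length + 1 + 1 - 2 = (rest'.length + 1 - 2) + 1 by omega,
          List.drop_succ_cons]
      simp [List.foldl_cons, List.append_assoc]

-- A's loop body equals appending B's binarization of the rule, with the same counter
lemma stepA_eq_binarize (subs : List Int) :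
    ∀ (out : List (Int × List Int)) (nt c : Int),
    pvStepA (out, c) (nt, subs) =
      (out ++ (pvBinarize nt subs c).1, (pvBinarize nt subs c).2) := by
  induction subs with
  | nil => intro out nt c; simp [pvStepA, pvBinarize]
  | cons s0 rest ih =>
    intro out nt c
    rcases Nat.lt_or_ge rest.length 2 with h2 | h2
    · -- total length ≤ 2: both copy the rule
      rw [pvBinarize, if_pos (by simp; omega)]
      simp only [pvStepA]
      rw [if_neg (by simp; omega)]
    · rw [stepA_shift out nt c s0 rest h2, ih, binarize_cons nt c s0 rest h2]
      simp [List.append_assoc]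

-- ===== VERDICT (by name: the statement is the Claim_ definition above) =====
theorem eliminate_long_rules_spec : Claim_equal_eliminate_long_rules := by
  intro G _
  unfold Spec_eliminate_long_rules eliminate_long_rules eliminate_long_rules_alt
  congr 1
  apply List.foldl_ext
  intro st p _
  obtain ⟨out, c⟩ := st
  obtain ⟨nt, subs⟩ := p
  exact stepA_eq_binarize subs out nt c
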